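-- pv_equiv track=rewrite | github.com/bensimner/rems-ifetch-harness | procdisplay.py | get_allowed
-- ===== SOURCE A (Python) =====
-- def get_allowed(allowed):
--     bits = bin(int(allowed.replace(',',''), 16))[2:]
--     if all(b == '1' for b in bits):
--         return ()
--     out = []
--     for i, b in enumerate(reversed(bits)):
--         if b == '1':
--             out.append(i)
--     return tuple(out)
-- ===== SOURCE B (Python) =====
-- def get_allowed(allowed):
--     n = int(allowed.replace(',', ''), 16)
--     if n > 0 and (n & (n + 1)) == 0:
--         return ()
--     out = []
--     while n > 0:
--         out.append((n & -n).bit_length() - 1)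
--         n &= n - 1
--     return tuple(out)
-- ===== Notes on version B (the rewrite author's own statement) =====
-- stated objective: alternative
-- what changed: A renders the parsed mask as a binary digit string and scans every character of it with enumerate(reversed(...)); B never builds a string and instead loops only over the set bits, extracting the lowest set bit with n&-n and clearing it with n&=n-1, with the all-ones shortcut reproduced arithmetically as n>0 and n&(n+1)==0.
-- intended difference: On inputs whose parsed hex value is negative, A scans a string that still contains the letter b left over from the stripped binary prefix and returns the set-bit positions of the absolute value, while B returns the empty tuple, the intended answer for a mask with no set nonnegative bits. — e.g. on get_allowed("-1"): A returns [0], B returns []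
import Mathlib
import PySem

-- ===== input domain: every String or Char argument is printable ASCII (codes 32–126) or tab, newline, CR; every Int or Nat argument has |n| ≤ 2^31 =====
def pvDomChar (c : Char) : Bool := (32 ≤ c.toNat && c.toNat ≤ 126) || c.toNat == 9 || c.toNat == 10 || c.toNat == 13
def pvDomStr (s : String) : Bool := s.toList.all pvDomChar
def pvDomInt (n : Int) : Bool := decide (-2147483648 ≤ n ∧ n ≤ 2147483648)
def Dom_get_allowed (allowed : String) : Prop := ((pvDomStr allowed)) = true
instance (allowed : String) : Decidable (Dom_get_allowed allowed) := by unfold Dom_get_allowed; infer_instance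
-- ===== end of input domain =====

-- B replaces A's binary-string building and scan (bin/enumerate/reversed) by a bit-trick loop
-- that visits only the set bits (lowest set bit via n&-n, cleared via n&=n-1); objective: alternative.

-- ===== PORT A =====
-- literal port of A; where Python's base-16 parse raises ValueError (PySem.Int.ofStrBase? = none,
-- excluded by Pre_) the port returns [].
def get_allowed (allowed : String) : List Int :=
  match PySem.Int.ofStrBase? (PySem.Str.replace allowed "," "") 16 with
  | none => []
  | some n =>
    let bits : List Char := PySem.List.slice (PySem.Int.pyBin n).toList (some 2) none
    if bits.all (· == '1') then []
    else
      (PySem.List.enumerate bits.reverse 0).foldl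
        (fun out p => if p.2 == '1' then out ++ [p.1] else out) []

-- ===== PORT B =====
-- the 'while n > 0' loop of Source B; fuel = n.toNat + 1 only makes the recursion structural
-- (each step clears the lowest set bit, so n strictly decreases and fuel never runs out).
def bloop : Nat → Int → List Int → List Int
  | 0, _, out => out
  | fuel + 1, n, out =>
    if 0 < n then
      bloop fuel (PySem.Int.band n (n - 1))
        (out ++ [((PySem.Int.bitLength (PySem.Int.band n (-n)) : Int) - 1)])
    else out

def get_allowed_alt (allowed : String) : List Int :=
  match PySem.Int.ofStrBase? (PySem.Str.replace allowed "," "") 16 with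
  | none => []
  | some n =>
    if 0 < n ∧ PySem.Int.band n (n + 1) = 0 then []
    else bloop (n.toNat + 1) n []

-- ===== PRECONDITION & SPEC =====
-- Pre_ excludes exactly the strings whose comma-stripped text is not a valid base-16 integer
-- literal, where Python's int(..., 16) raises ValueError (A propagates that exception).
def Pre_get_allowed (allowed : String) : Prop :=
  (PySem.Int.ofStrBase? (PySem.Str.replace allowed "," "") 16).isSome = true
instance (allowed : String) : Decidable (Pre_get_allowed allowed) := by
  unfold Pre_get_allowed; infer_instance
def pvWitness_get_allowed : String := "f,0"

-- On negative hex masks A returns the set-bit positions of |n| (an artefact of bin(n)[2:],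
-- which leaves the letter b of the stripped binary prefix in the scanned string), while B
-- returns the empty tuple, the intended answer for a mask with no set nonnegative bits.
def D_get_allowed (allowed : String) : Prop :=
  (PySem.Int.ofStrBase? (PySem.Str.replace allowed "," "") 16).getD 0 < 0
instance (allowed : String) : Decidable (D_get_allowed allowed) := by
  unfold D_get_allowed; infer_instance

def Spec_get_allowed (allowed : String) (out : List Int) : Prop :=
  ¬ D_get_allowed allowed → out = get_allowed_alt allowed
instance (allowed : String) (out : List Int) : Decidable (Spec_get_allowed allowed out) := by
  unfold Spec_get_allowed; infer_instance

def pvDiffWitness_get_allowed : String := "-1"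
def pvDiffWitnessOut_get_allowed : (List Int) × (List Int) := ([0], [])

-- ===== CLAIM (what is proved, stated in full; the proofs are below) =====
def Claim_unchanged_get_allowed : Prop := ∀ (allowed : String), Dom_get_allowed allowed → Pre_get_allowed allowed → Spec_get_allowed allowed (get_allowed allowed)
def Claim_changed_get_allowed : Prop := Dom_get_allowed (pvDiffWitness_get_allowed) ∧ Pre_get_allowed (pvDiffWitness_get_allowed) ∧ D_get_allowed (pvDiffWitness_get_allowed) ∧ get_allowed (pvDiffWitness_get_allowed) = pvDiffWitnessOut_get_allowed.1 ∧ get_allowed_alt (pvDiffWitness_get_allowed) = pvDiffWitnessOut_get_allowed.2 ∧ pvDiffWitnessOut_get_allowed.1 ≠ pvDiffWitnessOut_get_allowed.2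
def Claim_exact_get_allowed : Prop := ∀ (allowed : String), Dom_get_allowed allowed → Pre_get_allowed allowed → D_get_allowed allowed → get_allowed allowed ≠ get_allowed_alt allowed

-- ===== LEMMAS AND PROOFS =====

-- LSB-first positions (as Python ints) of the 1-digits of a binary digit list
def pos1 : List Nat → List Int
  | [] => []
  | d :: r => (if d = 1 then [(0 : Int)] else []) ++ (pos1 r).map (· + 1)

theorem land_eo (a b : Nat) : (2 * a) &&& (2 * b + 1) = 2 * (a &&& b) := by
  simpa [Nat.bit] using Nat.land_bit false a true b
theorem land_oe (a b : Nat) : (2 * a + 1) &&& (2 * b) = 2 * (a &&& b) := by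
  simpa [Nat.bit] using Nat.land_bit true a false b
theorem land_pred_odd (k : Nat) : (2 * k + 1) &&& (2 * k) = 2 * k := by
  simpa [Nat.and_self] using land_oe k k
theorem land_pred_lt (m : Nat) (h : 0 < m) : m &&& (m - 1) < m :=
  Nat.lt_of_le_of_lt Nat.and_le_right (by omega)
theorem digits_two_odd (k : Nat) : Nat.digits 2 (2 * k + 1) = 1 :: Nat.digits 2 k := by
  have h1 : (2 * k + 1) % 2 = 1 := by omega
  have h2 : (2 * k + 1) / 2 = k := by omega
  rw [Nat.digits_def' (by omega : (1:Nat) < 2) (by omega), h1, h2]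
theorem digits_two_even (k : Nat) (h : 0 < k) : Nat.digits 2 (2 * k) = 0 :: Nat.digits 2 k := by
  have h1 : (2 * k) % 2 = 0 := by omega
  have h2 : (2 * k) / 2 = k := by omega
  rw [Nat.digits_def' (by omega : (1:Nat) < 2) (by omega), h1, h2]
theorem pos1_digits_double (k : Nat) :
    pos1 (Nat.digits 2 (2 * k)) = (pos1 (Nat.digits 2 k)).map (· + 1) := by
  rcases Nat.eq_zero_or_pos k with h0 | hpos
  · subst h0; simp [pos1]
  · rw [digits_two_even _ hpos]; simp [pos1]
theorem bitLength_double (x : Nat) (h : 0 < x) :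
    PySem.Int.bitLength ((2 * x : Nat) : Int) = PySem.Int.bitLength (x : Int) + 1 := by
  have := PySem.Int.bitLength_natCast (m := 2 * x) (by omega)
  simpa [Nat.mul_div_cancel_left x (by omega : 0 < 2)] using this

theorem pos1_digits_step (m : Nat) (h : 0 < m) :
    pos1 (Nat.digits 2 m)
      = ((PySem.Int.bitLength ((m - (m &&& (m - 1)) : Nat) : Int) : Int) - 1)
        :: pos1 (Nat.digits 2 (m &&& (m - 1))) := by
  induction m using Nat.strong_induction_on with
  | _ m IH =>
  rcases Nat.even_or_odd m with ⟨k, hk⟩ | ⟨k, hk⟩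
  · -- even, m = 2k, k > 0
    have hk0 : 0 < k := by omega
    have hm : m = 2 * k := by omega
    subst hm
    have h1 : 2 * k - 1 = 2 * (k - 1) + 1 := by omega
    have h2 : 2 * k &&& (2 * k - 1) = 2 * (k &&& (k - 1)) := by rw [h1, land_eo]
    have hlow : 2 * k - 2 * (k &&& (k - 1)) = 2 * (k - (k &&& (k - 1))) := by
      have := land_pred_lt k hk0; omega
    have hlowpos : 0 < k - (k &&& (k - 1)) := by have := land_pred_lt k hk0; omega
    rw [h2, digits_two_even k hk0, hlow, bitLength_double _ hlowpos, pos1_digits_double]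
    simp only [pos1, if_neg (by omega : ¬ (0:Nat) = 1), List.nil_append]
    rw [IH k (by omega) hk0]
    simp only [List.map_cons]
    congr 1
    push_cast
    ring
  · -- odd, m = 2k+1
    have hm : m = 2 * k + 1 := by omega
    subst hm
    have h1 : 2 * k + 1 - 1 = 2 * k := by omega
    rw [h1, land_pred_odd, digits_two_odd, pos1_digits_double]
    have hlow : 2 * k + 1 - 2 * k = 1 := by omega
    rw [hlow]
    have hb1 : PySem.Int.bitLength ((1:Nat) : Int) = 1 := by decide
    rw [hb1]
    simp [pos1]
theorem band_neg_self (m : Nat) (h : 0 < m) :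
    PySem.Int.band (m : Int) (-(m : Int)) = ((m - (m &&& (m - 1)) : Nat) : Int) := by
  have h1 : ¬ (0 ≤ -(m : Int)) := by omega
  simp only [PySem.Int.band, if_pos (by positivity : (0:Int) ≤ (m:Int)), if_neg h1]
  have h2 : (-(-(m:Int)) - 1).toNat = m - 1 := by omega
  have h3 : ((m:Int)).toNat = m := by omega
  rw [h2, h3]
theorem band_natCast_pred (m : Nat) (h : 0 < m) :
    PySem.Int.band (m : Int) ((m : Int) - 1) = ((m &&& (m - 1) : Nat) : Int) := by
  have : ((m : Int) - 1) = ((m - 1 : Nat) : Int) := by omega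
  rw [this, PySem.Int.band_natCast]
theorem bloop_eq (m : Nat) : ∀ (f : Nat) (out : List Int), m < f →
    bloop f (m : Int) out = out ++ pos1 (Nat.digits 2 m) := by
  induction m using Nat.strong_induction_on with
  | _ m IH =>
  intro f out hf
  match f, hf with
  | f + 1, hf =>
  rcases Nat.eq_zero_or_pos m with h0 | hpos
  · subst h0; simp [bloop, pos1]
  · have hlt : ¬ ((m : Int) ≤ 0) := by omega
    simp only [bloop, if_pos (by omega : (0:Int) < (m:Int))]
    rw [band_natCast_pred m hpos, band_neg_self m hpos]
    rw [IH (m &&& (m - 1)) (land_pred_lt m hpos) f _ (by have := land_pred_lt m hpos; omega)]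
    rw [pos1_digits_step m hpos]
    simp

theorem digits_all_one_iff (m : Nat) (h : 0 < m) :
    (∀ d ∈ Nat.digits 2 m, d = 1) ↔ m &&& (m + 1) = 0 := by
  induction m using Nat.strong_induction_on with
  | _ m IH =>
  rcases Nat.even_or_odd m with ⟨k, hk⟩ | ⟨k, hk⟩
  · have hk0 : 0 < k := by omega
    have hm : m = 2 * k := by omega
    subst hm
    have h2 : 2 * k &&& (2 * k + 1) = 2 * (k &&& k) := land_eo k k
    rw [digits_two_even k hk0, h2, Nat.and_self]
    constructor
    · intro hall; exact absurd (hall 0 (by simp)) (by omega)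
    · intro hz; omega
  · have hm : m = 2 * k + 1 := by omega
    subst hm
    have h2 : (2 * k + 1) &&& (2 * k + 2) = 2 * (k &&& (k + 1)) := by
      have : 2 * k + 2 = 2 * (k + 1) := by omega
      rw [this, land_oe]
    have h3 : 2 * k + 1 + 1 = 2 * k + 2 := by omega
    rw [digits_two_odd, h3, h2]
    rcases Nat.eq_zero_or_pos k with h0 | hpos
    · subst h0; simp
    · rw [show (2 * (k &&& (k+1)) = 0) ↔ (k &&& (k+1) = 0) by omega]
      rw [← IH k (by omega) hpos]
      simp

theorem pos1_digits_ne_nil (m : Nat) (h : 0 < m) : pos1 (Nat.digits 2 m) ≠ [] := by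
  induction m using Nat.strong_induction_on with
  | _ m IH =>
  rcases Nat.even_or_odd m with ⟨k, hk⟩ | ⟨k, hk⟩
  · have hk0 : 0 < k := by omega
    have hm : m = 2 * k := by omega
    subst hm
    rw [pos1_digits_double]
    simpa using IH k (by omega) hk0
  · have hm : m = 2 * k + 1 := by omega
    subst hm
    rw [digits_two_odd]
    simp [pos1]
theorem toDigitsCore_eq (f : Nat) : ∀ (n : Nat) (ds : List Char), 0 < n → n < f →
    Nat.toDigitsCore 2 f n ds = ((Nat.digits 2 n).map Nat.digitChar).reverse ++ ds := by
  induction f with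
  | zero => intro n ds h hf; omega
  | succ f IH =>
    intro n ds h hf
    show (let d := (n % 2).digitChar;
          let n' := n / 2;
          if n' = 0 then d :: ds else Nat.toDigitsCore 2 f n' (d :: ds))
        = ((Nat.digits 2 n).map Nat.digitChar).reverse ++ ds
    simp only
    rw [Nat.digits_def' (by omega : (1:Nat) < 2) h]
    by_cases hn' : n / 2 = 0
    · rw [if_pos hn', hn']
      simp
    · rw [if_neg hn']
      rw [IH (n / 2) _ (by omega) (by omega)]
      simp

theorem toDigits_two_eq (m : Nat) (h : 0 < m) :
    Nat.toDigits 2 m = ((Nat.digits 2 m).map Nat.digitChar).reverse := by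
  simpa using toDigitsCore_eq (m + 1) m [] h (by omega)

theorem digitChar_beq_one (d : Nat) (h : d < 2) : (Nat.digitChar d == '1') = (d == 1) := by
  interval_cases d <;> decide

theorem enum_filter_eq (l : List Nat) (h : ∀ d ∈ l, d < 2) : ∀ (s : Int),
    (List.filter (fun p => p.2 == '1') (PySem.List.enumerate (l.map Nat.digitChar) s)).map Prod.fst
      = (pos1 l).map (s + ·) := by
  induction l with
  | nil => intro s; simp [pos1]
  | cons d r IH =>
    intro s
    have hd : d < 2 := h d (by simp)
    have hr : ∀ x ∈ r, x < 2 := fun x hx => h x (by simp [hx])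
    simp only [List.map_cons, PySem.List.enumerate_cons, List.filter_cons]
    have hmaps : ((pos1 r).map (· + 1)).map (s + ·) = (pos1 r).map ((s + 1) + ·) := by
      rw [List.map_map]
      apply List.map_congr_left
      intro x _
      simp [Function.comp]
      ring
    rcases (by omega : d = 0 ∨ d = 1) with h0 | h1
    · subst h0
      rw [if_neg (by decide)]
      rw [IH hr (s + 1)]
      simp [pos1, hmaps]
    · subst h1
      rw [if_pos (by decide)]
      simp only [List.map_cons, IH hr (s + 1)]
      simp [pos1, hmaps]

theorem all_chars_iff (l : List Nat) (h : ∀ d ∈ l, d < 2) :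
    (((l.map Nat.digitChar).reverse).all (· == '1') = true) ↔ (∀ d ∈ l, d = 1) := by
  rw [List.all_reverse]
  simp only [List.all_map, List.all_eq_true]
  constructor
  · intro hall d hd
    have := hall d hd
    rw [Function.comp_apply, digitChar_beq_one d (h d hd)] at this
    simpa using this
  · intro hall d hd
    rw [Function.comp_apply, digitChar_beq_one d (h d hd)]
    simp [hall d hd]

theorem digits_lt_two (m : Nat) : ∀ d ∈ Nat.digits 2 m, d < 2 := fun _ hd =>
  Nat.digits_lt_base (by omega) hd

-- the two ports agree on every nonnegative parsed value
theorem core_agree (m : Nat) :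
    (let bits : List Char := PySem.List.slice (PySem.Int.pyBin (m : Int)).toList (some 2) none;
     if bits.all (· == '1') then ([] : List Int)
     else (PySem.List.enumerate bits.reverse 0).foldl
        (fun out p => if p.2 == '1' then out ++ [p.1] else out) [])
    = (if 0 < (m : Int) ∧ PySem.Int.band (m : Int) ((m : Int) + 1) = 0 then ([] : List Int)
       else bloop ((m : Int).toNat + 1) (m : Int) []) := by
  rcases Nat.eq_zero_or_pos m with h0 | hpos
  · subst h0; decide
  · have hbits : PySem.List.slice (PySem.Int.pyBin (m : Int)).toList (some 2) none
        = ((Nat.digits 2 m).map Nat.digitChar).reverse := by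
      rw [PySem.Int.toList_pyBin]
      rw [PySem.List.slice_from _ (by omega : (0:Int) ≤ 2)]
      simp only [PySem.Int.toBinChars0b, if_neg (by omega : ¬ ((m:Int) < 0)),
        Int.toNat_natCast]
      rw [toDigits_two_eq m hpos]
      rfl
    simp only [hbits]
    have hcast : ((m : Int) + 1) = ((m + 1 : Nat) : Int) := by push_cast; ring
    have hband : PySem.Int.band (m : Int) ((m : Int) + 1) = ((m &&& (m + 1) : Nat) : Int) := by
      rw [hcast, PySem.Int.band_natCast]
    by_cases hc : m &&& (m + 1) = 0
    · rw [if_pos ((all_chars_iff _ (digits_lt_two m)).mpr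
        ((digits_all_one_iff m hpos).mpr hc))]
      rw [if_pos ⟨by omega, by rw [hband, hc]; rfl⟩]
    · rw [if_neg (fun hall => hc ((digits_all_one_iff m hpos).mp
        ((all_chars_iff _ (digits_lt_two m)).mp hall)))]
      rw [if_neg (fun ⟨_, hb⟩ => hc (by rw [hband] at hb; exact_mod_cast hb))]
      rw [List.reverse_reverse, PySem.List.foldl_append_if (fun p => p.2 == '1') Prod.fst]
      rw [enum_filter_eq _ (digits_lt_two m) 0]
      rw [Int.toNat_natCast, bloop_eq m (m + 1) [] (by omega)]
      simp

-- ===== VERDICT (by name: the statement is the Claim_ definition above) =====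
theorem get_allowed_spec : Claim_unchanged_get_allowed := by
  intro allowed _ hPre hND
  simp only [Pre_get_allowed] at hPre
  simp only [D_get_allowed] at hND
  rcases Option.isSome_iff_exists.mp hPre with ⟨n, hp⟩
  rw [hp] at hND
  simp only [Option.getD_some] at hND
  show get_allowed allowed = get_allowed_alt allowed
  simp only [get_allowed, get_allowed_alt, hp]
  have hn : 0 ≤ n := by omega
  lift n to Nat using hn with m
  exact core_agree m

theorem get_allowed_changed : Claim_changed_get_allowed := by
  unfold Claim_changed_get_allowed; decide

theorem get_allowed_tight : Claim_exact_get_allowed := by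
  intro allowed _ hPre hD
  simp only [Pre_get_allowed] at hPre
  simp only [D_get_allowed] at hD
  rcases Option.isSome_iff_exists.mp hPre with ⟨n, hp⟩
  rw [hp] at hD
  simp only [Option.getD_some] at hD
  simp only [get_allowed, get_allowed_alt, hp]
  ·     -- B's side is []
    have hB : (if 0 < n ∧ PySem.Int.band n (n + 1) = 0 then ([] : List Int)
        else bloop (n.toNat + 1) n []) = [] := by
      rw [if_neg (fun ⟨h1, _⟩ => by omega)]
      have : n.toNat = 0 := by omega
      rw [this]
      simp only [bloop, if_neg (by omega : ¬ (0:Int) < n)]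
    rw [hB]
    -- A's side is pos1 (digits of |n|), which is nonempty
    set m := n.natAbs with hm
    have hmpos : 0 < m := by omega
    have hbits : PySem.List.slice (PySem.Int.pyBin n).toList (some 2) none
        = 'b' :: ((Nat.digits 2 m).map Nat.digitChar).reverse := by
      rw [PySem.Int.toList_pyBin]
      rw [PySem.List.slice_from _ (by omega : (0:Int) ≤ 2)]
      simp only [PySem.Int.toBinChars0b, if_pos (by omega : n < 0)]
      rw [toDigits_two_eq m hmpos]
      rfl
    simp only [hbits]
    rw [if_neg (by simp)]
    rw [List.reverse_cons, List.reverse_reverse,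
      PySem.List.foldl_append_if (fun p => p.2 == '1') Prod.fst]
    rw [PySem.List.enumerate_append, List.filter_append, List.map_append]
    rw [enum_filter_eq _ (digits_lt_two m) 0]
    have hb : List.filter (fun p => p.2 == '1')
        (PySem.List.enumerate ['b'] (0 + ((Nat.digits 2 m).map Nat.digitChar).length)) = [] := by
      rw [PySem.List.enumerate_cons, PySem.List.enumerate_nil]
      simp
    rw [hb]
    simp only [List.map_nil, List.append_nil, List.nil_append]
    intro heq
    apply pos1_digits_ne_nil m hmpos
    have : (pos1 (Nat.digits 2 m)).map ((0:Int) + ·) = pos1 (Nat.digits 2 m) := by simp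
    rw [this] at heq
    exact heq
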